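-- pv_equiv track=rewrite | github.com/hirosuzuki/procon | atcoder/abc/abc023_b.py | solve
-- ===== SOURCE A (Python) =====
-- def solve(N, S):
--     i = 0
--     x = 'b'
--     while len(x) < len(S):
--         i += 1
--         if i % 3 == 1:
--             x = "a" + x + "c"
--         elif i % 3 == 2:
--             x = "c" + x + "a"
--         else:
--             x = "b" + x + "b"
--     if x == S:
--         return i
--     else:
--         return -1
-- ===== SOURCE B (Python) =====
-- def solve(N, S):
--     n = len(S)
--     if n % 2 == 0:
--         return -1
--     i = n // 2
--     if S[i] != 'b':
--         return -1
--     for d in range(1, i + 1):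
--         r = d % 3
--         front = 'a' if r == 1 else ('c' if r == 2 else 'b')
--         back = 'c' if r == 1 else ('a' if r == 2 else 'b')
--         if S[i - d] != front or S[i + d] != back:
--             return -1
--     return i
-- ===== Notes on version B (the rewrite author's own statement) =====
-- stated objective: faster
-- what changed: B computes the step count directly from len(S) and verifies each character against the position formula in a single O(n) pass, instead of rebuilding the nested string step by step with O(n^2) string concatenations.
import Mathlib
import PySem

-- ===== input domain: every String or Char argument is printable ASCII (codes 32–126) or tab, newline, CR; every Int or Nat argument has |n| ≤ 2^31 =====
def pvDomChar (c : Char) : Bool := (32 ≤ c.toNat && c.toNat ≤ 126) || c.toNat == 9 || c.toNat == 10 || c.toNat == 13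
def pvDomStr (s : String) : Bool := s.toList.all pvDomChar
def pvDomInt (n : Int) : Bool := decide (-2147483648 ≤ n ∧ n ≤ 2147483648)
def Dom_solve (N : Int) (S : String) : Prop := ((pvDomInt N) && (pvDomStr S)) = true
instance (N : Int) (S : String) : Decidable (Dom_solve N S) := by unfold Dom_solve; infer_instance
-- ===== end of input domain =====

-- B rebuilds nothing: it computes the step count from the length and checks each char by a
-- position formula in one pass (O(n) vs A's O(n^2) repeated string concatenation).

-- ===== PORT A =====
-- A's while-loop: grow x by one layer per step until it is at least as long as S.
def solveLoop (L : List Char) (i : Nat) (x : List Char) : Nat × List Char :=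
  if x.length < L.length then
    let i' := i + 1
    let x' := if i' % 3 = 1 then 'a' :: x ++ ['c']
              else if i' % 3 = 2 then 'c' :: x ++ ['a']
              else 'b' :: x ++ ['b']
    solveLoop L i' x'
  else (i, x)
termination_by L.length - x.length
decreasing_by simp_all [x']; split_ifs <;> simp <;> omega

def solve (N : Int) (S : String) : Int :=
  let L := S.toList
  let r := solveLoop L 0 ['b']
  if r.2 = L then (r.1 : Int) else -1

-- ===== PORT B =====
def frontCh (d : Nat) : Char := if d % 3 = 1 then 'a' else if d % 3 = 2 then 'c' else 'b'
def backCh (d : Nat) : Char := if d % 3 = 1 then 'c' else if d % 3 = 2 then 'a' else 'b'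

-- B's for-loop over d = 1..i with early return -1.
def solveAltLoop (L : List Char) (i : Nat) (d : Nat) : Int :=
  if d ≤ i then
    if L.getD (i - d) ' ' ≠ frontCh d ∨ L.getD (i + d) ' ' ≠ backCh d then -1
    else solveAltLoop L i (d + 1)
  else (i : Int)
termination_by i + 1 - d

def solve_alt (N : Int) (S : String) : Int :=
  let L := S.toList
  let n := L.length
  if n % 2 = 0 then -1
  else
    let i := n / 2
    if L.getD i ' ' ≠ 'b' then -1
    else solveAltLoop L i 1

-- ===== PRECONDITION & SPEC =====
def Spec_solve (N : Int) (S : String) (out : Int) : Prop := out = solve_alt N S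
instance (N : Int) (S : String) (out : Int) : Decidable (Spec_solve N S out) := by unfold Spec_solve; infer_instance

-- ===== CLAIM (what is proved, stated in full; the proofs are below) =====
def Claim_equal_solve : Prop := ∀ (N : Int) (S : String), Dom_solve N S → Spec_solve N S (solve N S)

-- ===== LEMMAS AND PROOFS =====

-- The string A has built after k steps.
def X : Nat → List Char
  | 0 => ['b']
  | k + 1 => frontCh (k + 1) :: X k ++ [backCh (k + 1)]

theorem X_length (k : Nat) : (X k).length = 2 * k + 1 := by
  induction k with
  | zero => rfl
  | succ k ih => simp [X, ih]; omega

theorem X_getD (i j : Nat) (hj : j ≤ 2 * i) :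
    (X i).getD j ' ' =
      if j < i then frontCh (i - j) else if j = i then 'b' else backCh (j - i) := by
  induction i generalizing j with
  | zero => interval_cases j <;> simp [X]
  | succ i ih =>
    have hlen : (X i).length = 2 * i + 1 := X_length i
    match j with
    | 0 => simp [X]
    | j + 1 =>
      rcases Nat.lt_or_ge j (X i).length with hlt | hge
      · have h1 : (X (i+1)).getD (j+1) ' ' = (X i).getD j ' ' := by
          show (frontCh (i+1) :: (X i ++ [backCh (i+1)])).getD (j+1) ' ' = _
          rw [List.getD_cons_succ]
          exact List.getD_append _ _ _ _ hlt
        rw [h1, ih j (by omega)]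
        have hji : j ≤ 2 * i := by omega
        split_ifs <;> first | rfl | omega |
          (congr 1 <;> omega)
      · have hj2 : j = 2 * i + 1 := by omega
        subst hj2
        have h1 : (X (i+1)).getD (2*i+1+1) ' ' = backCh (i+1) := by
          show (frontCh (i+1) :: (X i ++ [backCh (i+1)])).getD (2*i+1+1) ' ' = _
          rw [List.getD_cons_succ]
          have h2 : (X i ++ [backCh (i+1)]).getD (X i).length ' ' = backCh (i+1) := by
            simp [List.getD]
          rwa [hlen] at h2
        rw [h1]
        split_ifs <;> first | omega | (congr 1; omega)

theorem solveLoop_step (L : List Char) (k : Nat) (h : (X k).length < L.length) :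
    solveLoop L k (X k) = solveLoop L (k+1) (X (k+1)) := by
  conv_lhs => rw [solveLoop]
  rw [if_pos h]
  show solveLoop L (k+1)
      (if (k+1) % 3 = 1 then 'a' :: X k ++ ['c']
       else if (k+1) % 3 = 2 then 'c' :: X k ++ ['a']
       else 'b' :: X k ++ ['b']) = _
  congr 1
  show _ = frontCh (k+1) :: X k ++ [backCh (k+1)]
  simp only [frontCh, backCh]
  split_ifs <;> rfl

theorem solveLoop_X (L : List Char) (k : Nat) :
    solveLoop L k (X k) = (max k (L.length / 2), X (max k (L.length / 2))) := by
  have H : ∀ n k, L.length / 2 - k ≤ n →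
      solveLoop L k (X k) = (max k (L.length / 2), X (max k (L.length / 2))) := by
    intro n
    induction n with
    | zero =>
      intro k hk
      have hge : L.length / 2 ≤ k := by omega
      have hnot : ¬ (X k).length < L.length := by rw [X_length]; omega
      rw [solveLoop, if_neg hnot]
      have : max k (L.length / 2) = k := by omega
      rw [this]
    | succ n ih =>
      intro k hk
      by_cases hlt : (X k).length < L.length
      · have hklen : k < L.length / 2 := by have := X_length k; omega
        rw [solveLoop_step L k hlt, ih (k+1) (by omega)]
        have : max (k+1) (L.length / 2) = max k (L.length / 2) := by omega
        rw [this]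
      · rw [solveLoop, if_neg hlt]
        have : max k (L.length / 2) = k := by have := X_length k; omega
        rw [this]
  exact H (L.length / 2 - k) k le_rfl

theorem solveAltLoop_eq_iff (L : List Char) (i d : Nat) :
    solveAltLoop L i d = (i : Int) ↔
      ∀ e, d ≤ e → e ≤ i → L.getD (i - e) ' ' = frontCh e ∧ L.getD (i + e) ' ' = backCh e := by
  have H : ∀ n d, i + 1 - d ≤ n →
      (solveAltLoop L i d = (i : Int) ↔
        ∀ e, d ≤ e → e ≤ i → L.getD (i - e) ' ' = frontCh e ∧ L.getD (i + e) ' ' = backCh e) := by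
    intro n
    induction n with
    | zero =>
      intro d hd
      have hdi : ¬ d ≤ i := by omega
      rw [solveAltLoop, if_neg hdi]
      constructor
      · intro _ e he1 he2; omega
      · intro _; rfl
    | succ n ih =>
      intro d hd
      by_cases hdi : d ≤ i
      · rw [solveAltLoop, if_pos hdi]
        by_cases hchk : L.getD (i - d) ' ' ≠ frontCh d ∨ L.getD (i + d) ' ' ≠ backCh d
        · rw [if_pos hchk]
          constructor
          · intro hbad; exfalso; omega
          · intro hall
            exfalso
            rcases hchk with h | h
            · exact h (hall d le_rfl hdi).1
            · exact h (hall d le_rfl hdi).2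
        · rw [if_neg hchk]
          push_neg at hchk
          rw [ih (d+1) (by omega)]
          constructor
          · intro hall e he1 he2
            rcases Nat.eq_or_lt_of_le he1 with heq | hlt
            · subst heq; exact hchk
            · exact hall e (by omega) he2
          · intro hall e he1 he2; exact hall e (by omega) he2
      · rw [solveAltLoop, if_neg hdi]
        constructor
        · intro _ e he1 he2; omega
        · intro _; rfl
  exact H (i + 1 - d) d le_rfl

theorem solveAltLoop_cases (L : List Char) (i d : Nat) :
    solveAltLoop L i d = (i : Int) ∨ solveAltLoop L i d = -1 := by
  have H : ∀ n d, i + 1 - d ≤ n →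
      solveAltLoop L i d = (i : Int) ∨ solveAltLoop L i d = -1 := by
    intro n
    induction n with
    | zero =>
      intro d hd
      rw [solveAltLoop, if_neg (by omega : ¬ d ≤ i)]
      exact Or.inl rfl
    | succ n ih =>
      intro d hd
      by_cases hdi : d ≤ i
      · rw [solveAltLoop, if_pos hdi]
        split_ifs with h
        · exact Or.inr rfl
        · exact ih (d+1) (by omega)
      · rw [solveAltLoop, if_neg hdi]
        exact Or.inl rfl
  exact H (i + 1 - d) d le_rfl

theorem eq_X_iff (L : List Char) (i : Nat) (hlen : L.length = 2 * i + 1) :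
    L = X i ↔ (L.getD i ' ' = 'b' ∧
      ∀ e, 1 ≤ e → e ≤ i → L.getD (i - e) ' ' = frontCh e ∧ L.getD (i + e) ' ' = backCh e) := by
  constructor
  · intro hL
    subst hL
    refine ⟨?_, ?_⟩
    · rw [X_getD i i (by omega)]; simp
    · intro e he1 he2
      constructor
      · rw [X_getD i (i - e) (by omega), if_pos (by omega)]
        congr 1; omega
      · rw [X_getD i (i + e) (by omega), if_neg (by omega), if_neg (by omega)]
        congr 1; omega
  · rintro ⟨hb, hall⟩
    apply List.ext_getElem (by rw [hlen, X_length])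
    intro j hj1 hj2
    have hj : j < 2 * i + 1 := by rwa [hlen] at hj1
    have hLg : L.getD j ' ' = L[j] := List.getD_eq_getElem L ' ' hj1
    have hXg : (X i).getD j ' ' = (X i)[j] := List.getD_eq_getElem (X i) ' ' hj2
    rw [← hLg, ← hXg, X_getD i j (by omega)]
    rcases Nat.lt_trichotomy j i with hlt | heq | hgt
    · rw [if_pos hlt]
      have := (hall (i - j) (by omega) (by omega)).1
      have hjj : i - (i - j) = j := by omega
      rw [hjj] at this
      exact this
    · subst heq
      rw [if_neg (by omega), if_pos rfl]
      exact hb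
    · rw [if_neg (by omega), if_neg (by omega)]
      have := (hall (j - i) (by omega) (by omega)).2
      have hjj : i + (j - i) = j := by omega
      rw [hjj] at this
      exact this

-- ===== VERDICT (by name: the statement is the Claim_ definition above) =====
theorem solve_spec : Claim_equal_solve := by
  intro N S _
  unfold Spec_solve
  have hloop : solveLoop S.toList 0 ['b'] = (S.toList.length / 2, X (S.toList.length / 2)) := by
    have h := solveLoop_X S.toList 0
    simpa [X] using h
  have hA : solve N S =
      (if X (S.toList.length / 2) = S.toList then ((S.toList.length / 2 : Nat) : Int) else -1) := by
    show (if (solveLoop S.toList 0 ['b']).2 = S.toList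
          then ((solveLoop S.toList 0 ['b']).1 : Int) else -1) = _
    rw [hloop]
  have hB : solve_alt N S =
      (if S.toList.length % 2 = 0 then -1
       else if S.toList.getD (S.toList.length / 2) ' ' ≠ 'b' then -1
       else solveAltLoop S.toList (S.toList.length / 2) 1) := rfl
  rw [hA, hB]
  set L := S.toList with hLdef
  set n := L.length with hndef
  set m := n / 2 with hmdef
  by_cases hpar : n % 2 = 0
  · rw [if_pos hpar]
    have hne : X m ≠ L := by
      intro heq
      have := X_length m
      rw [heq] at this
      omega
    rw [if_neg hne]
  · rw [if_neg hpar]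
    have hn : n = 2 * m + 1 := by omega
    by_cases hbchar : L.getD m ' ' = 'b'
    · rw [if_neg (not_not_intro hbchar)]
      rcases solveAltLoop_cases L m 1 with hc | hc
      · have hall := (solveAltLoop_eq_iff L m 1).mp hc
        have hLX : L = X m := (eq_X_iff L m (by omega)).mpr ⟨hbchar, hall⟩
        rw [if_pos hLX.symm, hc]
      · rw [hc]
        have hne : X m ≠ L := by
          intro heq
          have hall := ((eq_X_iff L m (by omega)).mp heq.symm).2
          have := (solveAltLoop_eq_iff L m 1).mpr hall
          rw [hc] at this
          omega
        rw [if_neg hne]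
    · rw [if_pos hbchar]
      have hne : X m ≠ L := by
        intro heq
        apply hbchar
        rw [← heq, X_getD m m (by omega)]
        simp
      rw [if_neg hne]
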